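-- pv_equiv track=rewrite | github.com/wooveep/aigateway-group | scripts/aigateway-dev.py | child_indent
-- ===== SOURCE A (Python) =====
-- def count_indent(line: str) -> int:
--     return len(line) - len(line.lstrip(" "))
--
-- def block_end(lines: list[str], index: int) -> int:
--     parent_indent = count_indent(lines[index])
--     for i in range(index + 1, len(lines)):
--         stripped = lines[i].strip()
--         if not stripped or stripped.startswith("#"):
--             continue
--         if count_indent(lines[i]) <= parent_indent:
--             return i
--     return len(lines)
--
-- def child_indent(lines: list[str], index: int) -> int:
--     parent_indent = count_indent(lines[index])
--     end = block_end(lines, index)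
--     for i in range(index + 1, end):
--         stripped = lines[i].strip()
--         if not stripped or stripped.startswith("#"):
--             continue
--         indent = count_indent(lines[i])
--         if indent > parent_indent:
--             return indent
--     return parent_indent + 2
-- ===== SOURCE B (Python) =====
-- def count_indent(line: str) -> int:
--     return len(line) - len(line.lstrip(" "))
--
-- def child_indent(lines: list[str], index: int) -> int:
--     parent_indent = count_indent(lines[index])
--     for i in range(index + 1, len(lines)):
--         stripped = lines[i].strip()
--         if not stripped or stripped.startswith("#"):
--             continue
--         indent = count_indent(lines[i])
--         return indent if indent > parent_indent else parent_indent + 2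
--     return parent_indent + 2
-- ===== Notes on version B (the rewrite author's own statement) =====
-- stated objective: simpler
-- what changed: B replaces A's two passes (block_end to find the end of the block, then a rescan up to that end) by one single scan from index+1 that decides everything at the first significant line.
import Mathlib
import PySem

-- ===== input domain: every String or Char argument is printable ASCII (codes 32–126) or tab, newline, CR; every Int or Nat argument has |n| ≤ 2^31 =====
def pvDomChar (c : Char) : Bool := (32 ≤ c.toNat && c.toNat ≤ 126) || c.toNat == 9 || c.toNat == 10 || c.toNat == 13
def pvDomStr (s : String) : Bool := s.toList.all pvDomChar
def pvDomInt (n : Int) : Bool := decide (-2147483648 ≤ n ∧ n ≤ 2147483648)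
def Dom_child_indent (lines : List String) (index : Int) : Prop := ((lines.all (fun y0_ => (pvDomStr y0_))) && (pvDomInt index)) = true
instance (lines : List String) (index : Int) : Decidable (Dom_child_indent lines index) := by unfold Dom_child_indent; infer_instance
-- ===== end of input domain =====

-- B replaces A's two passes (block_end, then a rescan up to that end) by one single scan
-- from index+1 that decides everything at the first significant line; same return value.


-- ===== PORT A =====
-- hand port of line.lstrip(" ") (strip the single character ' ' from the left); exact:
-- Python removes exactly the maximal run of leading space characters.
def pvLstripSp (cs : List Char) : List Char := cs.dropWhile (fun c => c == ' ')

-- count_indent(line) = len(line) - len(line.lstrip(" "))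
def pvCountIndent (line : String) : Int :=
  (line.toList.length : Int) - (pvLstripSp line.toList).length

-- the 'for i in range(index+1, len(lines))' loop of block_end, over the list of indices
def pvBlockEndGo (lines : List String) (parentIndent : Int) : List Int → Int
  | [] => (lines.length : Int)
  | i :: rest =>
    let stripped := PySem.Str.strip (PySem.List.pyGetD lines i "")
    if stripped == "" || PySem.Str.startswith stripped "#" then
      pvBlockEndGo lines parentIndent rest
    else if pvCountIndent (PySem.List.pyGetD lines i "") ≤ parentIndent then i
    else pvBlockEndGo lines parentIndent rest

def pvBlockEnd (lines : List String) (index : Int) : Int :=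
  let parentIndent := pvCountIndent (PySem.List.pyGetD lines index "")
  pvBlockEndGo lines parentIndent (PySem.List.pyRange (index + 1) lines.length 1)

-- the 'for i in range(index+1, end)' loop of child_indent
def pvChildGoA (lines : List String) (parentIndent : Int) : List Int → Int
  | [] => parentIndent + 2
  | i :: rest =>
    let stripped := PySem.Str.strip (PySem.List.pyGetD lines i "")
    if stripped == "" || PySem.Str.startswith stripped "#" then
      pvChildGoA lines parentIndent rest
    else
      let indent := pvCountIndent (PySem.List.pyGetD lines i "")
      if parentIndent < indent then indent
      else pvChildGoA lines parentIndent rest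

def child_indent (lines : List String) (index : Int) : Int :=
  let parentIndent := pvCountIndent (PySem.List.pyGetD lines index "")
  let «end» := pvBlockEnd lines index
  pvChildGoA lines parentIndent (PySem.List.pyRange (index + 1) «end» 1)

-- ===== PORT B =====
-- single loop: the first significant line decides everything
def pvChildGoB (lines : List String) (parentIndent : Int) : List Int → Int
  | [] => parentIndent + 2
  | i :: rest =>
    let stripped := PySem.Str.strip (PySem.List.pyGetD lines i "")
    if stripped == "" || PySem.Str.startswith stripped "#" then
      pvChildGoB lines parentIndent rest
    else
      let indent := pvCountIndent (PySem.List.pyGetD lines i "")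
      if parentIndent < indent then indent else parentIndent + 2

def child_indent_alt (lines : List String) (index : Int) : Int :=
  let parentIndent := pvCountIndent (PySem.List.pyGetD lines index "")
  pvChildGoB lines parentIndent (PySem.List.pyRange (index + 1) lines.length 1)

-- ===== PRECONDITION & SPEC =====
-- Python's lines[index] raises IndexError when index is out of range (negative indices count from the end)
def Pre_child_indent (lines : List String) (index : Int) : Prop :=
  PySem.Raise.InRange lines.length index
instance (lines : List String) (index : Int) : Decidable (Pre_child_indent lines index) := by
  unfold Pre_child_indent; infer_instance

def pvWitness_child_indent : List String × Int := (["def f():", "    x = 1"], 0)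

def Spec_child_indent (lines : List String) (index : Int) (out : Int) : Prop := out = child_indent_alt lines index
instance (lines : List String) (index : Int) (out : Int) : Decidable (Spec_child_indent lines index out) := by unfold Spec_child_indent; infer_instance

-- ===== CLAIM (what is proved, stated in full; the proofs are below) =====
def Claim_equal_child_indent : Prop := ∀ (lines : List String) (index : Int), Dom_child_indent lines index → Pre_child_indent lines index → Spec_child_indent lines index (child_indent lines index)

-- ===== LEMMAS AND PROOFS =====

-- block_end's loop never returns an index below the start of the range it scans
theorem pvBlockEndGo_ge (lines : List String) (parent : Int) :
    ∀ (k : Nat) (a : Int), ((lines.length : Int) - a).toNat = k → a ≤ (lines.length : Int) →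
      a ≤ pvBlockEndGo lines parent (PySem.List.pyRange a lines.length 1) := by
  intro k
  induction k with
  | zero =>
    intro a hk ha
    have : (lines.length : Int) ≤ a := by omega
    rw [PySem.List.pyRange_one_eq_nil this]
    simp only [pvBlockEndGo]
    omega
  | succ k ih =>
    intro a hk ha
    have hlt : a < (lines.length : Int) := by omega
    rw [PySem.List.pyRange_one_cons hlt]
    simp only [pvBlockEndGo]
    split
    · have := ih (a + 1) (by omega) (by omega)
      omega
    · split
      · omega
      · have := ih (a + 1) (by omega) (by omega)
        omega

-- main loop equivalence: A's two-pass scheme equals B's single scan, from any start a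
theorem pvChild_loops_eq (lines : List String) (parent : Int) :
    ∀ (k : Nat) (a : Int), ((lines.length : Int) - a).toNat = k →
      pvChildGoA lines parent
        (PySem.List.pyRange a (pvBlockEndGo lines parent (PySem.List.pyRange a lines.length 1)) 1)
      = pvChildGoB lines parent (PySem.List.pyRange a lines.length 1) := by
  intro k
  induction k with
  | zero =>
    intro a hk
    have hle : (lines.length : Int) ≤ a := by omega
    rw [PySem.List.pyRange_one_eq_nil hle]
    simp only [pvBlockEndGo, pvChildGoB]
    rw [PySem.List.pyRange_one_eq_nil (by omega)]
    simp [pvChildGoA]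
  | succ k ih =>
    intro a hk
    have hlt : a < (lines.length : Int) := by omega
    rw [PySem.List.pyRange_one_cons hlt]
    simp only [pvBlockEndGo, pvChildGoB]
    by_cases hskip :
        (PySem.Str.strip (PySem.List.pyGetD lines a "") == "" ||
         PySem.Str.startswith (PySem.Str.strip (PySem.List.pyGetD lines a "")) "#") = true
    · simp only [hskip, if_true]
      have hge : a + 1 ≤ pvBlockEndGo lines parent (PySem.List.pyRange (a+1) lines.length 1) :=
        pvBlockEndGo_ge lines parent ((lines.length : Int) - (a+1)).toNat (a+1) rfl (by omega)
      rw [PySem.List.pyRange_one_cons (by omega :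
            a < pvBlockEndGo lines parent (PySem.List.pyRange (a+1) lines.length 1))]
      simp only [pvChildGoA, hskip, if_true]
      exact ih (a + 1) (by omega)
    · simp only [hskip, if_false, Bool.false_eq_true]
      by_cases hind : pvCountIndent (PySem.List.pyGetD lines a "") ≤ parent
      · simp only [if_pos hind]
        rw [PySem.List.pyRange_one_eq_nil (le_refl a)]
        simp only [pvChildGoA]
        have : ¬ parent < pvCountIndent (PySem.List.pyGetD lines a "") := by omega
        simp [this]
      · simp only [if_neg hind]
        have hge : a + 1 ≤ pvBlockEndGo lines parent (PySem.List.pyRange (a+1) lines.length 1) :=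
          pvBlockEndGo_ge lines parent ((lines.length : Int) - (a+1)).toNat (a+1) rfl (by omega)
        rw [PySem.List.pyRange_one_cons (by omega :
              a < pvBlockEndGo lines parent (PySem.List.pyRange (a+1) lines.length 1))]
        simp only [pvChildGoA, hskip, if_false, Bool.false_eq_true]
        have : parent < pvCountIndent (PySem.List.pyGetD lines a "") := by omega
        simp [this]

-- ===== VERDICT (by name: the statement is the Claim_ definition above) =====
theorem child_indent_spec : Claim_equal_child_indent := by
  intro lines index _ _
  unfold Spec_child_indent child_indent child_indent_alt pvBlockEnd
  exact pvChild_loops_eq lines (pvCountIndent (PySem.List.pyGetD lines index ""))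
    ((lines.length : Int) - (index + 1)).toNat (index + 1) rfl
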